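-- pv_equiv track=rewrite | github.com/imperium-docs/imperium-docs | atlas-pipeline/src/main.py | _select_by_windows
-- ===== SOURCE A (Python) =====
-- def _select_by_windows(items: list[dict]) -> tuple[list[dict], dict[str, str]]:
--     selected: list[dict] = []
--     decisions: dict[str, str] = {}
--     grouped: dict[str, list[dict]] = {}
--     for item in items:
--         grouped.setdefault(item["event_type"], []).append(item)
--
--     for event_type, events in grouped.items():
--         narrowed = [event for event in events if event.get("window") == "narrow"]
--         medium = [event for event in events if event.get("window") == "medium"]
--         long = [event for event in events if event.get("window") == "long"]
--         pick: dict | None = None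
--         if narrowed:
--             pick = narrowed[0]
--             decisions[event_type] = "narrow_window"
--         elif medium:
--             pick = medium[0]
--             decisions[event_type] = "medium_window"
--         elif long:
--             pick = long[0]
--             decisions[event_type] = "long_window"
--         else:
--             decisions[event_type] = "no_candidate"
--         if pick:
--             selected.append(pick)
--
--     return selected, decisions
-- ===== SOURCE B (Python) =====
-- def _select_by_windows(items: list[dict]) -> tuple[list[dict], dict[str, str]]:
--     # single pass: remember, per event_type, the first event seen for each window
--     order: list[str] = []
--     state: dict[str, tuple] = {}
--     for item in items:
--         et = item["event_type"]
--         if et not in state: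
--             order.append(et)
--             state[et] = (None, None, None)
--         n, m, l = state[et]
--         w = item.get("window")
--         if w == "narrow" and n is None:
--             state[et] = (item, m, l)
--         elif w == "medium" and m is None:
--             state[et] = (n, item, l)
--         elif w == "long" and l is None:
--             state[et] = (n, m, item)
--     selected: list[dict] = []
--     decisions: dict[str, str] = {}
--     for et in order:
--         n, m, l = state[et]
--         if n is not None:
--             selected.append(n)
--             decisions[et] = "narrow_window"
--         elif m is not None:
--             selected.append(m)
--             decisions[et] = "medium_window"
--         elif l is not None:
--             selected.append(l)
--             decisions[et] = "long_window"
--         else: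
--             decisions[et] = "no_candidate"
--     return selected, decisions
-- ===== Notes on version B (the rewrite author's own statement) =====
-- stated objective: simpler
-- what changed: Replaces the grouped dict-of-lists plus three per-group filter comprehensions and if/elif chain by a single pass that records, per event_type, the first event seen for each of the three windows, then emits the highest-priority recorded event per type.
import Mathlib
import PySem

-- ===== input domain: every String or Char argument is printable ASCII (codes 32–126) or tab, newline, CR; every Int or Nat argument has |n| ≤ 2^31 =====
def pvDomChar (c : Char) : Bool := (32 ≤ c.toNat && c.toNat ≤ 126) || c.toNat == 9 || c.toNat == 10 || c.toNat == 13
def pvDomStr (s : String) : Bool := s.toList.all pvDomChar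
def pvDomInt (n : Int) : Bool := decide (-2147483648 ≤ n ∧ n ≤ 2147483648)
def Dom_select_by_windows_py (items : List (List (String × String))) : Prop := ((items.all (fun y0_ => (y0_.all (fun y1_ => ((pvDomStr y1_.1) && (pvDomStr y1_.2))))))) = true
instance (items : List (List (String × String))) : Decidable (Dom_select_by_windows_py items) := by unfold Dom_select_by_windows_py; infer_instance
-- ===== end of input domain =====

-- B replaces A's grouped dict-of-lists + three per-group filters + if/elif chain by a single pass
-- recording, per event_type, the first event seen for each window; outputs proved equal on Pre_.

-- shared single-item Python-dict lookups: item["event_type"] (under Pre_) and item.get("window")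
def pvKey (it : List (String × String)) : String :=
  ((PySem.Dict.mk it).get? "event_type").getD ""

def pvWin (it : List (String × String)) : Option String :=
  (PySem.Dict.mk it).get? "window"

-- ===== PORT A =====

def pvAStep (acc : List (List (String × String)) × PySem.Dict String String)
    (p : String × List (List (String × String))) :
    List (List (String × String)) × PySem.Dict String String :=
  let narrowed := p.2.filter (fun e => pvWin e == some "narrow")
  let medium := p.2.filter (fun e => pvWin e == some "medium")
  let long := p.2.filter (fun e => pvWin e == some "long")
  let (pick, decisions) :=
    match narrowed with
    | e :: _ => (some e, acc.2.insert p.1 "narrow_window")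
    | [] =>
      match medium with
      | e :: _ => (some e, acc.2.insert p.1 "medium_window")
      | [] =>
        match long with
        | e :: _ => (some e, acc.2.insert p.1 "long_window")
        | [] => (none, acc.2.insert p.1 "no_candidate")
  -- Python's `if pick:`: a picked dict is truthy iff nonempty
  match pick with
  | some e => (if e.isEmpty then acc.1 else acc.1 ++ [e], decisions)
  | none => (acc.1, decisions)

def select_by_windows_py (items : List (List (String × String))) :
    (List (List (String × String))) × (List (String × String)) :=
  let grouped := items.foldl (fun d it => d.modify (pvKey it) [] (· ++ [it])) PySem.Dict.empty
  let r := grouped.items.foldl pvAStep ([], PySem.Dict.empty)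
  (r.1, r.2.items)

-- ===== PORT B =====

abbrev pvSlots := Option (List (String × String)) × Option (List (String × String)) × Option (List (String × String))

def pvBScan (acc : List String × PySem.Dict String pvSlots) (item : List (String × String)) :
    List String × PySem.Dict String pvSlots :=
  let et := pvKey item
  let acc1 := if acc.2.contains et then acc else (acc.1 ++ [et], acc.2.insert et (none, none, none))
  let s := acc1.2.getD et (none, none, none)
  let w := pvWin item
  if w == some "narrow" && s.1.isNone then (acc1.1, acc1.2.insert et (some item, s.2.1, s.2.2))
  else if w == some "medium" && s.2.1.isNone then (acc1.1, acc1.2.insert et (s.1, some item, s.2.2))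
  else if w == some "long" && s.2.2.isNone then (acc1.1, acc1.2.insert et (s.1, s.2.1, some item))
  else acc1

def pvBEmit (st : PySem.Dict String pvSlots)
    (acc : List (List (String × String)) × PySem.Dict String String) (et : String) :
    List (List (String × String)) × PySem.Dict String String :=
  match st.getD et (none, none, none) with
  | (some e, _, _) => (acc.1 ++ [e], acc.2.insert et "narrow_window")
  | (none, some e, _) => (acc.1 ++ [e], acc.2.insert et "medium_window")
  | (none, none, some e) => (acc.1 ++ [e], acc.2.insert et "long_window")
  | (none, none, none) => (acc.1, acc.2.insert et "no_candidate")

def select_by_windows_py_alt (items : List (List (String × String))) :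
    (List (List (String × String))) × (List (String × String)) :=
  let os := items.foldl pvBScan ([], PySem.Dict.empty)
  let r := os.1.foldl (pvBEmit os.2) ([], PySem.Dict.empty)
  (r.1, r.2.items)

-- ===== PRECONDITION & SPEC =====
-- Pre_ excludes exactly the inputs where some item lacks the "event_type" key: Python A raises KeyError there.
def Pre_select_by_windows_py (items : List (List (String × String))) : Prop :=
  (items.all (fun it => it.any (fun q => q.1 == "event_type"))) = true
instance (items : List (List (String × String))) : Decidable (Pre_select_by_windows_py items) := by
  unfold Pre_select_by_windows_py; infer_instance

def pvWitness_select_by_windows_py : List (List (String × String)) :=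
  [[("event_type", "a"), ("window", "narrow")], [("event_type", "b")]]

def Spec_select_by_windows_py (items : List (List (String × String))) (out : (List (List (String × String))) × (List (String × String))) : Prop := out = select_by_windows_py_alt items
instance (items : List (List (String × String))) (out : (List (List (String × String))) × (List (String × String))) : Decidable (Spec_select_by_windows_py items out) := by unfold Spec_select_by_windows_py; infer_instance

-- ===== CLAIM (what is proved, stated in full; the proofs are below) =====
def Claim_equal_select_by_windows_py : Prop := ∀ (items : List (List (String × String))), Dom_select_by_windows_py items → Pre_select_by_windows_py items → Spec_select_by_windows_py items (select_by_windows_py items)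

-- ===== LEMMAS AND PROOFS =====

def pvG (items : List (List (String × String))) (k : String) : List (List (String × String)) :=
  items.filter (fun it => pvKey it == k)

def pvF (items : List (List (String × String))) (k w : String) : Option (List (String × String)) :=
  (pvG items k).find? (fun e => pvWin e == some w)

def pvFill (s : pvSlots) (l : List (List (String × String))) (k : String) : pvSlots :=
  (s.1.or (pvF l k "narrow"), s.2.1.or (pvF l k "medium"), s.2.2.or (pvF l k "long"))

theorem pvF_cons_ne (it : List (String × String)) (rest : List (List (String × String))) (k w : String)
    (h : pvKey it ≠ k) : pvF (it :: rest) k w = pvF rest k w := by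
  simp [pvF, pvG, List.filter_cons, h]

theorem pvF_cons_self (it : List (String × String)) (rest : List (List (String × String))) (w : String) :
    pvF (it :: rest) (pvKey it) w
      = if pvWin it == some w then some it else pvF rest (pvKey it) w := by
  by_cases hw : pvWin it == some w <;> simp [pvF, pvG, List.filter_cons, List.find?_cons, hw]

theorem pvStepCore (order : List String) (st : PySem.Dict String pvSlots)
    (it : List (String × String)) (rest : List (List (String × String)))
    (h : ∀ k, st.contains k = decide (k ∈ order)) :
    (pvBScan (order, st) it).1 = PySem.Set.add order (pvKey it)
    ∧ (∀ k, (pvBScan (order, st) it).2.contains k = decide (k ∈ (pvBScan (order, st) it).1))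
    ∧ (∀ k, pvFill ((pvBScan (order, st) it).2.getD k (none, none, none)) rest k
        = pvFill (st.getD k (none, none, none)) (it :: rest) k) := by
  by_cases hc : st.contains (pvKey it) = true
  · have hmem : pvKey it ∈ order := by
      have h0 := h (pvKey it); rw [hc] at h0; exact of_decide_eq_true h0.symm
    have hadd : PySem.Set.add order (pvKey it) = order := PySem.Set.add_of_mem hmem
    rcases hsv : st.getD (pvKey it) (none, none, none) with ⟨s1, s2, s3⟩
    refine ⟨?_, ?_, ?_⟩
    · simp only [pvBScan, hc, if_true, hsv]
      split_ifs <;> simp [hadd]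
    · intro k
      simp only [pvBScan, hc, if_true, hsv]
      by_cases hk : k = pvKey it <;>
        split_ifs <;>
          simp [PySem.Dict.contains_insert, hk, hmem, h k, hadd, hc]
    · intro k
      by_cases hk : k = pvKey it
      · subst hk
        simp only [pvBScan, hc, if_true, hsv]
        by_cases hwn : pvWin it = some "narrow"
        · cases s1 <;>
            simp [hwn, PySem.Dict.getD_insert, hsv, pvFill, pvF_cons_self, Option.some_or, Option.none_or]
        · by_cases hwm : pvWin it = some "medium"
          · cases s1 <;> cases s2 <;>
              simp [hwn, hwm, PySem.Dict.getD_insert, hsv, pvFill, pvF_cons_self, Option.some_or, Option.none_or]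
          · by_cases hwl : pvWin it = some "long"
            · cases s1 <;> cases s2 <;> cases s3 <;>
                simp [hwn, hwm, hwl, PySem.Dict.getD_insert, hsv, pvFill, pvF_cons_self, Option.some_or, Option.none_or]
            · cases s1 <;> cases s2 <;> cases s3 <;>
                simp [hwn, hwm, hwl, PySem.Dict.getD_insert, hsv, pvFill, pvF_cons_self, Option.some_or, Option.none_or]
      · have hne : pvKey it ≠ k := fun hh => hk hh.symm
        simp only [pvBScan, hc, if_true, hsv]
        split_ifs <;>
          simp [pvFill, PySem.Dict.getD_insert, hk, pvF_cons_ne _ _ _ _ hne]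
  · have hcf : st.contains (pvKey it) = false := by simpa using hc
    have hmem : pvKey it ∉ order := by
      have h0 := h (pvKey it); rw [hcf] at h0
      exact of_decide_eq_false h0.symm
    have hadd : PySem.Set.add order (pvKey it) = order ++ [pvKey it] :=
      PySem.Set.add_of_not_mem hmem
    have hget0 : st.getD (pvKey it) (none, none, none) = (none, none, none) :=
      PySem.Dict.getD_of_not_contains _ _ hcf
    refine ⟨?_, ?_, ?_⟩
    · simp only [pvBScan, hcf, if_false, Bool.false_eq_true]
      split_ifs <;> simp [hadd, PySem.Dict.getD_insert]
    · intro k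
      simp only [pvBScan, hcf, if_false, Bool.false_eq_true]
      by_cases hk : k = pvKey it <;>
        split_ifs <;>
          simp_all [PySem.Dict.contains_insert, PySem.Dict.getD_insert, h k, hadd]
    · intro k
      by_cases hk : k = pvKey it
      · subst hk
        simp only [pvBScan, hcf, if_false, Bool.false_eq_true]
        by_cases hwn : pvWin it = some "narrow"
        · simp [hwn, PySem.Dict.getD_insert, hget0, pvFill, pvF_cons_self, Option.none_or]
        · by_cases hwm : pvWin it = some "medium"
          · simp [hwn, hwm, PySem.Dict.getD_insert, hget0, pvFill, pvF_cons_self, Option.none_or]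
          · by_cases hwl : pvWin it = some "long"
            · simp [hwn, hwm, hwl, PySem.Dict.getD_insert, hget0, pvFill, pvF_cons_self, Option.none_or]
            · simp [hwn, hwm, hwl, PySem.Dict.getD_insert, hget0, pvFill, pvF_cons_self, Option.none_or]
      · have hne : pvKey it ≠ k := fun hh => hk hh.symm
        simp only [pvBScan, hcf, if_false, Bool.false_eq_true]
        split_ifs <;>
          simp [pvFill, PySem.Dict.getD_insert, hk, pvF_cons_ne _ _ _ _ hne]

theorem pvScanInv (l : List (List (String × String))) :
    ∀ (order : List String) (st : PySem.Dict String pvSlots),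
    (∀ k, st.contains k = decide (k ∈ order)) →
    (l.foldl pvBScan (order, st)).1 = PySem.Set.update order (l.map pvKey)
    ∧ ∀ k, (l.foldl pvBScan (order, st)).2.getD k (none, none, none)
        = pvFill (st.getD k (none, none, none)) l k := by
  induction l with
  | nil =>
    intro order st h
    refine ⟨by simp [PySem.Set.update_nil], ?_⟩
    intro k
    simp [pvFill, pvF, pvG, Option.or_none]
  | cons it rest ih =>
    intro order st h
    obtain ⟨h1, h2, h3⟩ := pvStepCore order st it rest h
    obtain ⟨ihA, ihB⟩ := ih (pvBScan (order, st) it).1 (pvBScan (order, st) it).2 h2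
    constructor
    · rw [List.foldl_cons, List.map_cons, PySem.Set.update_cons, ← h1]
      simpa using ihA
    · intro k
      rw [List.foldl_cons, ← h3 k]
      simpa using ihB k

theorem pvF_eq_head? (items : List (List (String × String))) (k w : String) :
    pvF items k w = ((pvG items k).filter (fun e => pvWin e == some w)).head? :=
  (List.head?_filter).symm

theorem pvStepEq (items : List (List (String × String))) (st : PySem.Dict String pvSlots)
    (hpre : ∀ e ∈ items, e.isEmpty = false)
    (hst : ∀ k, st.getD k (none, none, none)
        = (pvF items k "narrow", pvF items k "medium", pvF items k "long"))
    (k : String) (acc : List (List (String × String)) × PySem.Dict String String) :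
    pvAStep acc (k, pvG items k) = pvBEmit st acc k := by
  have hmem : ∀ (e : List (String × String)) (p : List (String × String) → Bool)
      (t : List (List (String × String))),
      (pvG items k).filter p = e :: t → e.isEmpty = false := by
    intro e p t hf
    apply hpre
    exact List.mem_of_mem_filter (List.mem_of_mem_filter (hf ▸ List.mem_cons_self))
  rcases hn : (pvG items k).filter (fun e => pvWin e == some "narrow") with _ | ⟨e, t⟩
  · rcases hm : (pvG items k).filter (fun e => pvWin e == some "medium") with _ | ⟨e, t⟩
    · rcases hl : (pvG items k).filter (fun e => pvWin e == some "long") with _ | ⟨e, t⟩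
      · simp [pvAStep, pvBEmit, hst k, pvF_eq_head?, hn, hm, hl]
      · simp [pvAStep, pvBEmit, hst k, pvF_eq_head?, hn, hm, hl, hmem e _ t hl]
    · simp [pvAStep, pvBEmit, hst k, pvF_eq_head?, hn, hm, hmem e _ t hm]
  · simp [pvAStep, pvBEmit, hst k, pvF_eq_head?, hn, hmem e _ t hn]

theorem pv_grouped (items : List (List (String × String))) :
    (items.foldl (fun d it => d.modify (pvKey it) [] (· ++ [it])) PySem.Dict.empty).items
      = (PySem.Set.ofList (items.map pvKey)).map (fun k => (k, pvG items k)) := by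
  have hnd := PySem.Dict.nodup_keys_foldl_modify_key items pvKey []
      (fun _ it => (· ++ [it])) PySem.Dict.empty (by simp [PySem.Dict.keys_empty])
  have hkeys := PySem.Dict.keys_foldl_modify_key items pvKey []
      (fun _ it => (· ++ [it])) PySem.Dict.empty
  have hgetD : ∀ k, (items.foldl (fun d it => d.modify (pvKey it) [] (· ++ [it])) PySem.Dict.empty).getD k []
      = pvG items k := by
    intro k
    have h1 : items.foldl (fun d it => d.modify (pvKey it) [] (· ++ [it])) PySem.Dict.empty
        = (items.map (fun it => (pvKey it, it))).foldl (fun d p => d.modify p.1 [] (· ++ [p.2])) PySem.Dict.empty := by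
      rw [List.foldl_map]
    rw [h1, PySem.Dict.getD_foldl_modify_append, PySem.Dict.getD_empty]
    simp [pvG, List.filter_map, Function.comp_def]
  rw [PySem.Dict.items_eq_map_keys _ hnd []]
  rw [hkeys]
  simp only [PySem.Dict.keys_empty, PySem.Set.update_nil_left]
  exact List.map_congr_left (fun k _ => by rw [hgetD k])

theorem pv_final (items : List (List (String × String)))
    (hpre : (items.all (fun it => it.any (fun q => q.1 == "event_type"))) = true) :
    select_by_windows_py items = select_by_windows_py_alt items := by
  have hpre' : ∀ e ∈ items, e.isEmpty = false := by
    intro e he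
    have h2 := List.all_eq_true.mp hpre e he
    cases e with
    | nil => simp at h2
    | cons a l => rfl
  obtain ⟨hord, hst⟩ := pvScanInv items [] PySem.Dict.empty
    (by intro k; simp [PySem.Dict.contains_empty])
  have hst' : ∀ k, (items.foldl pvBScan ([], PySem.Dict.empty)).2.getD k (none, none, none)
      = (pvF items k "narrow", pvF items k "medium", pvF items k "long") := by
    intro k; rw [hst k]; simp [pvFill, PySem.Dict.getD_empty, Option.none_or]
  simp only [select_by_windows_py, select_by_windows_py_alt]
  have hordK : (items.foldl pvBScan ([], PySem.Dict.empty)).1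
      = PySem.Set.ofList (items.map pvKey) := by
    rw [hord, PySem.Set.update_nil_left]
  rw [pv_grouped items, List.foldl_map, hordK]
  rw [PySem.List.foldl_congr_mem' (PySem.Set.ofList (items.map pvKey))
      (fun acc k => pvAStep acc (k, pvG items k))
      (pvBEmit (items.foldl pvBScan ([], PySem.Dict.empty)).2) ([], PySem.Dict.empty)
      (fun k _ acc => pvStepEq items _ hpre' hst' k acc)]

-- ===== VERDICT (by name: the statement is the Claim_ definition above) =====
theorem select_by_windows_py_spec : Claim_equal_select_by_windows_py := by
  intro items _ hpre
  exact pv_final items hpre
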